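-- pv_equiv track=rewrite | github.com/fahadysf/netscreen-filter-and-convert | parse-ns-config.py | CountValidAddressObjects
-- ===== SOURCE A (Python) =====
-- def CountValidAddressObjects(addressobjdict):
--     validcnt = 0
--     invalidcnt = 0
--     for k, v in addressobjdict.items():
--         if v['valid']:
--             validcnt += 1
--         else:
--             invalidcnt += 1
--     return validcnt, invalidcnt
-- ===== SOURCE B (Python) =====
-- def CountValidAddressObjects(addressobjdict):
--     def go(items):
--         if not items:
--             return (0, 0)
--         if len(items) == 1:
--             v = items[0][1]
--             return (1, 0) if v['valid'] else (0, 1)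
--         mid = len(items) // 2
--         lv, li = go(items[:mid])
--         rv, ri = go(items[mid:])
--         return (lv + rv, li + ri)
--     return go(list(addressobjdict.items()))
-- ===== Notes on version B (the rewrite author's own statement) =====
-- stated objective: alternative
-- what changed: B counts by divide-and-conquer: it recursively splits the item list in half, counts each half, and adds the (valid, invalid) pairs, instead of A's single linear pass incrementing two accumulators in an if/else.
import Mathlib
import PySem

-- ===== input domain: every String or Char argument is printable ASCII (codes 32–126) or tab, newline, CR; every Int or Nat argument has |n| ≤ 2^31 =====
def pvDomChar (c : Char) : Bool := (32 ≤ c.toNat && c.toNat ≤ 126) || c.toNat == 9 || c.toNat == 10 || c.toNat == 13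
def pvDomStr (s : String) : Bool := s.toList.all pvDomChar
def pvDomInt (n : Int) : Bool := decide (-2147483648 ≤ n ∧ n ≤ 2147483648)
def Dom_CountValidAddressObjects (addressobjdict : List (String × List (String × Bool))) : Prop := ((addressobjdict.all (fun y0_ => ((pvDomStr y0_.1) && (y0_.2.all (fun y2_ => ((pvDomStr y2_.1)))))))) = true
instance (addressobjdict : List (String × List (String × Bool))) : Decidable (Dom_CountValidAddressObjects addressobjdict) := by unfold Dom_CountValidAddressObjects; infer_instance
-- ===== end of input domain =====

-- B replaces A's linear two-accumulator loop by a divide-and-conquer count (split the item list in half, count halves, add the pairs): a genuinely different traversal, same result.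
-- ===== PORT A =====
-- v['valid'] is ported as getD … false; Pre_ guarantees the key is present, so the default is never consulted on admitted inputs.
def CountValidAddressObjects (addressobjdict : List (String × List (String × Bool))) : Int × Int :=
  addressobjdict.foldl
    (fun (s : Int × Int) kv =>
      if (PySem.Dict.mk kv.2).getD "valid" false then (s.1 + 1, s.2) else (s.1, s.2 + 1))
    (0, 0)

-- ===== PORT B =====
-- literal transliteration of Source B's recursive helper 'go' (divide and conquer on the item list)
def pvGoDC (items : List (String × List (String × Bool))) : Int × Int :=
  if h0 : items = [] then (0, 0)
  else if h1 : items.length = 1 then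
    match items with
    | kv :: _ => if (PySem.Dict.mk kv.2).getD "valid" false then (1, 0) else (0, 1)
    | [] => (0, 0)
  else
    let mid := items.length / 2
    let l := pvGoDC (items.take mid)
    let r := pvGoDC (items.drop mid)
    (l.1 + r.1, l.2 + r.2)
termination_by items.length
decreasing_by
  · have hlen : items.length ≠ 0 := by simpa [List.length_eq_zero_iff] using h0
    simp only [List.length_take]
    omega
  · have hlen : items.length ≠ 0 := by simpa [List.length_eq_zero_iff] using h0
    simp only [List.length_drop]
    omega

def CountValidAddressObjects_alt (addressobjdict : List (String × List (String × Bool))) : Int × Int :=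
  pvGoDC addressobjdict

-- ===== PRECONDITION & SPEC =====
-- Pre_ excludes inputs where some value dict lacks the key 'valid': there Python A (and B) raises KeyError.
def Pre_CountValidAddressObjects (addressobjdict : List (String × List (String × Bool))) : Prop :=
  ∀ kv ∈ addressobjdict, (PySem.Dict.mk kv.2).contains "valid" = true
instance (addressobjdict : List (String × List (String × Bool))) : Decidable (Pre_CountValidAddressObjects addressobjdict) := by unfold Pre_CountValidAddressObjects; infer_instance
def pvWitness_CountValidAddressObjects : (List (String × List (String × Bool))) :=
  [("a", [("valid", true)]), ("b", [("valid", false)])]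

def Spec_CountValidAddressObjects (addressobjdict : List (String × List (String × Bool))) (out : Int × Int) : Prop := out = CountValidAddressObjects_alt addressobjdict
instance (addressobjdict : List (String × List (String × Bool))) (out : Int × Int) : Decidable (Spec_CountValidAddressObjects addressobjdict out) := by unfold Spec_CountValidAddressObjects; infer_instance

-- ===== CLAIM (what is proved, stated in full; the proofs are below) =====
def Claim_equal_CountValidAddressObjects : Prop := ∀ (addressobjdict : List (String × List (String × Bool))), Dom_CountValidAddressObjects addressobjdict → Pre_CountValidAddressObjects addressobjdict → Spec_CountValidAddressObjects addressobjdict (CountValidAddressObjects addressobjdict)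

-- ===== LEMMAS AND PROOFS =====
-- A's fold with two counters computes (count of valid, length - count of valid)
lemma foldl_two_counters (l : List (String × List (String × Bool))) (a b : Int) :
    l.foldl
      (fun (s : Int × Int) kv =>
        if (PySem.Dict.mk kv.2).getD "valid" false then (s.1 + 1, s.2) else (s.1, s.2 + 1))
      (a, b)
    = (a + (l.countP (fun kv => (PySem.Dict.mk kv.2).getD "valid" false) : Int),
       b + ((l.length : Int) - (l.countP (fun kv => (PySem.Dict.mk kv.2).getD "valid" false) : Int))) := by
  induction l generalizing a b with
  | nil => simp
  | cons kv t ih =>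
    by_cases h : (PySem.Dict.mk kv.2).getD "valid" false
    · simp [List.foldl_cons, h, ih]; ring
    · simp [List.foldl_cons, h, ih]; ring

-- B's divide-and-conquer computes the same closed form (strong induction on length)
lemma pvGoDC_eq_aux (n : Nat) :
    ∀ (l : List (String × List (String × Bool))), l.length ≤ n →
    pvGoDC l
    = ((l.countP (fun kv => (PySem.Dict.mk kv.2).getD "valid" false) : Int),
       (l.length : Int) - (l.countP (fun kv => (PySem.Dict.mk kv.2).getD "valid" false) : Int)) := by
  induction n with
  | zero =>
    intro l hl
    have : l = [] := List.length_eq_zero_iff.mp (Nat.le_zero.mp hl)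
    subst this
    simp [pvGoDC]
  | succ n ih =>
    intro l hl
    rw [pvGoDC]
    by_cases h0 : l = []
    · subst h0; simp
    · simp only [h0, dif_neg, not_false_iff]
      by_cases h1 : l.length = 1
      · obtain ⟨kv, t, rfl⟩ := List.exists_cons_of_ne_nil h0
        have ht : t = [] := by
          simp at h1
          exact h1
        subst ht
        by_cases h : (PySem.Dict.mk kv.2).getD "valid" false <;> simp [h, h1]
      · simp only [h1, dif_neg, not_false_iff]
        have hlen : l.length ≠ 0 := by simpa [List.length_eq_zero_iff] using h0
        have htk : (l.take (l.length / 2)).length ≤ n := by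
          simp only [List.length_take]; omega
        have hdr : (l.drop (l.length / 2)).length ≤ n := by
          simp only [List.length_drop]; omega
        have hsplit := List.take_append_drop (l.length / 2) l
        have hc : l.countP (fun kv => (PySem.Dict.mk kv.2).getD "valid" false)
            = (l.take (l.length / 2)).countP (fun kv => (PySem.Dict.mk kv.2).getD "valid" false)
              + (l.drop (l.length / 2)).countP (fun kv => (PySem.Dict.mk kv.2).getD "valid" false) := by
          conv_lhs => rw [← hsplit]
          rw [List.countP_append]
        have hl2 : l.length = (l.take (l.length / 2)).length + (l.drop (l.length / 2)).length := by
          conv_lhs => rw [← hsplit]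
          rw [List.length_append]
        simp only [ih _ htk, ih _ hdr, Prod.mk.injEq]
        constructor
        · omega
        · omega

lemma pvGoDC_eq (l : List (String × List (String × Bool))) :
    pvGoDC l
    = ((l.countP (fun kv => (PySem.Dict.mk kv.2).getD "valid" false) : Int),
       (l.length : Int) - (l.countP (fun kv => (PySem.Dict.mk kv.2).getD "valid" false) : Int)) :=
  pvGoDC_eq_aux l.length l (Nat.le_refl _)

-- ===== VERDICT (by name: the statement is the Claim_ definition above) =====
theorem CountValidAddressObjects_spec : Claim_equal_CountValidAddressObjects := by
  intro l _ _
  unfold Spec_CountValidAddressObjects CountValidAddressObjects CountValidAddressObjects_alt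
  rw [foldl_two_counters, pvGoDC_eq]
  simp
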